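-- pv_equiv track=rewrite | github.com/willizdev/compuba | Algoritmos/Introducción a la Programación/Python/Guías/Guía 10 - Integradora/p10.py | filtrar_codigos_primos
-- ===== SOURCE A (Python) =====
-- def filtrar_codigos_primos(codigos_barra: list[int]) -> list[int]:
--     def es_primo(numero: int) -> bool:
--         if numero < 2:
--             return False
--         for i in range(numero - 1, 1, -1):
--             if numero % i == 0:
--                 return False
--         return True
--
--     codigos_primos: list[int] = []
--
--     for codigo in codigos_barra:
--         if es_primo(codigo % 1000):
--             codigos_primos.append(codigo)
--
--     return codigos_primos
-- ===== SOURCE B (Python) =====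
-- def filtrar_codigos_primos(codigos_barra: list[int]) -> list[int]:
--     # Build a primality lookup table for 0..999 once (sqrt-bounded ascending trial
--     # division), then filter the codes with O(1) table lookups.
--     tabla = [n >= 2 and all(n % d != 0 for d in range(2, n) if d * d <= n)
--              for n in range(1000)]
--     return [codigo for codigo in codigos_barra if tabla[codigo % 1000]]
-- ===== Notes on version B (the rewrite author's own statement) =====
-- stated objective: faster
-- what changed: B precomputes a 1000-entry primality lookup table once (ascending, sqrt-bounded trial division) and then filters the codes with O(1) table lookups, instead of A's full downward trial division re-run for every code.
import Mathlib
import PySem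

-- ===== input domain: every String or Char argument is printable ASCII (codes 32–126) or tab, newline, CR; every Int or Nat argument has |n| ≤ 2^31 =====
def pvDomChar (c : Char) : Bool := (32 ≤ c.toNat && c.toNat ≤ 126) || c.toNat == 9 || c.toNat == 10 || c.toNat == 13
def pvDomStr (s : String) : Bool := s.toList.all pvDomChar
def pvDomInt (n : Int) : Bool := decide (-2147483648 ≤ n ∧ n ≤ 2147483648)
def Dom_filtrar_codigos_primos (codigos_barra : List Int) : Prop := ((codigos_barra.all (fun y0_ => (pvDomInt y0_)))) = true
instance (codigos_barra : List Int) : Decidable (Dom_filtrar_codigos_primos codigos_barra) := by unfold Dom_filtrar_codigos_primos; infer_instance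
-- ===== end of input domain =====

-- B builds a 0..999 primality lookup table once (sqrt-bounded ascending trial division) instead of
-- running full downward trial division per code element (objective: faster).

-- ===== PORT A =====
-- es_primo: downward trial division over range(numero-1, 1, -1), early return False on a divisor
def pvEsPrimoA (numero : Int) : Bool :=
  if numero < 2 then false
  else (PySem.List.pyRange (numero - 1) 1 (-1)).all (fun i => !(PySem.Int.mod numero i == 0))

def filtrar_codigos_primos (codigos_barra : List Int) : List Int :=
  codigos_barra.foldl
    (fun acc codigo => if pvEsPrimoA (PySem.Int.mod codigo 1000) then acc ++ [codigo] else acc) []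

-- ===== PORT B =====
-- the table entry: n >= 2 and all(n % d != 0 for d in range(2, n) if d * d <= n)
def pvEsPrimoB (n : Int) : Bool :=
  decide (2 ≤ n) &&
    ((PySem.List.pyRange 2 n 1).filter (fun d => decide (d * d ≤ n))).all
      (fun d => !(PySem.Int.mod n d == 0))

-- tabla = [… for n in range(1000)]
def pvTabla : List Bool := (PySem.List.pyRange 0 1000 1).map pvEsPrimoB

def filtrar_codigos_primos_alt (codigos_barra : List Int) : List Int :=
  codigos_barra.filter (fun codigo => PySem.List.pyGetD pvTabla (PySem.Int.mod codigo 1000) false)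

-- ===== PRECONDITION & SPEC =====
def Spec_filtrar_codigos_primos (codigos_barra : List Int) (out : List Int) : Prop := out = filtrar_codigos_primos_alt codigos_barra
instance (codigos_barra : List Int) (out : List Int) : Decidable (Spec_filtrar_codigos_primos codigos_barra out) := by unfold Spec_filtrar_codigos_primos; infer_instance

-- ===== CLAIM (what is proved, stated in full; the proofs are below) =====
def Claim_equal_filtrar_codigos_primos : Prop := ∀ (codigos_barra : List Int), Dom_filtrar_codigos_primos codigos_barra → Spec_filtrar_codigos_primos codigos_barra (filtrar_codigos_primos codigos_barra)

-- ===== LEMMAS AND PROOFS =====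

theorem pv_a_iff (m : Int) (hm : 2 ≤ m) :
    pvEsPrimoA m = true ↔ ∀ i : Int, 1 < i → i < m → ¬ (i ∣ m) := by
  simp only [pvEsPrimoA, if_neg (by omega : ¬ m < 2), List.all_eq_true,
    PySem.List.mem_pyRange_neg_one, Bool.not_eq_eq_eq_not, Bool.not_true, beq_eq_false_iff_ne,
    ne_eq, PySem.Int.mod_eq_zero_iff_dvd]
  constructor
  · intro h i h1 h2; exact h i ⟨h1, by omega⟩
  · intro h i ⟨h1, h2⟩; exact h i h1 (by omega)

theorem pv_b_iff (m : Int) (hm : 2 ≤ m) :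
    pvEsPrimoB m = true ↔ ∀ d : Int, 2 ≤ d → d < m → d * d ≤ m → ¬ (d ∣ m) := by
  simp only [pvEsPrimoB, Bool.and_eq_true, decide_eq_true_eq, List.all_eq_true, List.mem_filter,
    PySem.List.mem_pyRange_one, Bool.not_eq_eq_eq_not, Bool.not_true, beq_eq_false_iff_ne,
    ne_eq, PySem.Int.mod_eq_zero_iff_dvd]
  constructor
  · intro h d h2 hlt hsq; exact h.2 d ⟨⟨h2, hlt⟩, by simpa using hsq⟩
  · intro h; exact ⟨hm, fun d ⟨⟨h2, hlt⟩, hsq⟩ => h d h2 hlt (by simpa using hsq)⟩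

-- the divisor-pairing argument: a divisor of m in (1, m) yields one whose square is ≤ m
theorem pv_pair (m : Int) (hm : 2 ≤ m)
    (h : ∀ d : Int, 2 ≤ d → d < m → d * d ≤ m → ¬ (d ∣ m)) :
    ∀ i : Int, 1 < i → i < m → ¬ (i ∣ m) := by
  intro i h1 h2 hdvd
  obtain ⟨e, he⟩ := hdvd
  have hipos : (0:Int) < i := by omega
  have hepos : (0:Int) < e := by nlinarith
  have he2 : 2 ≤ e := by
    by_cases h' : e = 1
    · exfalso; rw [h', mul_one] at he; omega
    · omega
  by_cases hsq : i * i ≤ m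
  · exact h i (by omega) h2 hsq ⟨e, he⟩
  · have hei : e < i := by nlinarith
    have hee : e * e < m := by nlinarith
    have helt : e < m := by nlinarith
    exact h e he2 helt (le_of_lt hee) ⟨i, by rw [he, mul_comm]⟩

theorem pv_pointwise_all (m : Int) : pvEsPrimoA m = pvEsPrimoB m := by
  by_cases hm : m < 2
  · simp [pvEsPrimoA, pvEsPrimoB, hm, show ¬ (2 ≤ m) by omega]
  · have hm' : 2 ≤ m := by omega
    rw [Bool.eq_iff_iff, pv_a_iff m hm', pv_b_iff m hm']
    constructor
    · intro h d h2 hlt _; exact h d (by omega) hlt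
    · exact pv_pair m hm'

theorem pv_lookup (c : Int) :
    PySem.List.pyGetD pvTabla (PySem.Int.mod c 1000) false = pvEsPrimoB (PySem.Int.mod c 1000) := by
  have h0 : (0:Int) ≤ PySem.Int.mod c 1000 := PySem.Int.mod_nonneg c (by norm_num)
  have h1 : PySem.Int.mod c 1000 < 1000 := PySem.Int.mod_lt c (by norm_num)
  exact PySem.List.pyGetD_map_pyRange_of_nonneg pvEsPrimoB 1000 _ false h0 h1

-- ===== VERDICT (by name: the statement is the Claim_ definition above) =====
theorem filtrar_codigos_primos_spec : Claim_equal_filtrar_codigos_primos := by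
  intro codigos _
  unfold Spec_filtrar_codigos_primos filtrar_codigos_primos filtrar_codigos_primos_alt
  rw [PySem.List.foldl_append_if_eq_filter, List.nil_append]
  exact List.filter_congr fun c _ => by rw [pv_lookup, pv_pointwise_all]
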